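-- pv_equiv track=rewrite | github.com/Gradient-DS/open-webui | helm/open-webui-stack/scripts/restore-to-openwebui.py | map_librechat_tools_to_capabilities
-- ===== SOURCE A (Python) =====
-- from typing import Dict, List, Optional, Tuple
--
-- def map_librechat_tools_to_capabilities(tools: List[str]) -> dict:
--     """
--     Map LibreChat tool names to Open WebUI capability flags.
--
--     Args:
--         tools: List of LibreChat tool names
--
--     Returns:
--         Dict of Open WebUI capability flags
--     """
--     capabilities = {
--         "vision": True,  # Default to True, base model will validate
--         "file_upload": False,
--         "web_search": False,
--         "image_generation": False,
--         "code_interpreter": False,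
--         "citations": True,
--         "status_updates": True,
--         "usage": False,
--     }
--
--     tool_capability_map = {
--         "file_search": "file_upload",
--         "retrieval": "file_upload",
--         "web_search": "web_search",
--         "code_interpreter": "code_interpreter",
--         "execute_code": "code_interpreter",
--     }
--
--     for tool in tools:
--         if tool in tool_capability_map:
--             capabilities[tool_capability_map[tool]] = True
--
--     return capabilities
-- ===== SOURCE B (Python) =====
-- def map_librechat_tools_to_capabilities(tools):
--     """
--     Map LibreChat tool names to Open WebUI capability flags.
--
--     Loop-free: only three capability flags can ever be switched on, so
--     compute each one directly with membership tests on a set of the input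
--     and build the result dict literally in a single expression.
--     """
--     present = set(tools)
--     return {
--         "vision": True,  # Default to True, base model will validate
--         "file_upload": "file_search" in present or "retrieval" in present,
--         "web_search": "web_search" in present,
--         "image_generation": False,
--         "code_interpreter": "code_interpreter" in present or "execute_code" in present,
--         "citations": True,
--         "status_updates": True,
--         "usage": False,
--     }
-- ===== Notes on version B (the rewrite author's own statement) =====
-- stated objective: simpler
-- what changed: B removes the tool-scanning loop and the mutable dict entirely: it computes the three derivable flags by direct membership tests on a set of the input and returns the capabilities dict as one literal expression.
import Mathlib
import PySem

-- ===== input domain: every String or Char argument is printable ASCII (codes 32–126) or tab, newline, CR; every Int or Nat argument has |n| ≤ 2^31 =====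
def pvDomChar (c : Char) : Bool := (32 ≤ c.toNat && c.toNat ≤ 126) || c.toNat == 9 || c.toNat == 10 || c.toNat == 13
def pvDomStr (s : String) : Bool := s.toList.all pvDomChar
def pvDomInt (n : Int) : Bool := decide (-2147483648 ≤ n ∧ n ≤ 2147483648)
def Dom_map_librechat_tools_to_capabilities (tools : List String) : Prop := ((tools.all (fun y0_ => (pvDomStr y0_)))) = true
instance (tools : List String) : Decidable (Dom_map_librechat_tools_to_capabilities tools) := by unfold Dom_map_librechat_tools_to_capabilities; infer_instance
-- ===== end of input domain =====

-- B removes the tool-scanning loop and the mutable dict: it computes the three derivable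
-- flags by direct membership tests on a set of the input and returns the capabilities
-- dict as one literal expression (objective: simpler; same cost).

-- ===== PORT A =====
-- the literal `capabilities` dict of A
def capsInitA : PySem.Dict String Bool :=
  PySem.Dict.ofList [("vision", true), ("file_upload", false), ("web_search", false),
    ("image_generation", false), ("code_interpreter", false), ("citations", true),
    ("status_updates", true), ("usage", false)]

-- the literal `tool_capability_map` dict of A
def toolCapMapA : PySem.Dict String String :=
  PySem.Dict.ofList [("file_search", "file_upload"), ("retrieval", "file_upload"),
    ("web_search", "web_search"), ("code_interpreter", "code_interpreter"),
    ("execute_code", "code_interpreter")]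

def map_librechat_tools_to_capabilities (tools : List String) : List (String × Bool) :=
  (tools.foldl (fun caps tool =>
      match toolCapMapA.get? tool with
      | some cap => caps.insert cap true
      | none => caps) capsInitA).items

-- ===== PORT B =====
def map_librechat_tools_to_capabilities_alt (tools : List String) : List (String × Bool) :=
  let present : PySem.Set String := PySem.Set.ofList tools
  [("vision", true),
   ("file_upload", present.contains "file_search" || present.contains "retrieval"),
   ("web_search", present.contains "web_search"),
   ("image_generation", false),
   ("code_interpreter", present.contains "code_interpreter" || present.contains "execute_code"),
   ("citations", true),
   ("status_updates", true),
   ("usage", false)]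

-- ===== PRECONDITION & SPEC =====
def Spec_map_librechat_tools_to_capabilities (tools : List String) (out : List (String × Bool)) : Prop := out = map_librechat_tools_to_capabilities_alt tools
instance (tools : List String) (out : List (String × Bool)) : Decidable (Spec_map_librechat_tools_to_capabilities tools out) := by unfold Spec_map_librechat_tools_to_capabilities; infer_instance

-- ===== CLAIM (what is proved, stated in full; the proofs are below) =====
def Claim_equal_map_librechat_tools_to_capabilities : Prop := ∀ (tools : List String), Dom_map_librechat_tools_to_capabilities tools → Spec_map_librechat_tools_to_capabilities tools (map_librechat_tools_to_capabilities tools)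

-- ===== LEMMAS AND PROOFS =====

-- the capabilities dict parametrised by the three flags A's loop can flip
def capsD (bf bw bc : Bool) : PySem.Dict String Bool :=
  PySem.Dict.mk [("vision", true), ("file_upload", bf), ("web_search", bw),
    ("image_generation", false), ("code_interpreter", bc), ("citations", true),
    ("status_updates", true), ("usage", false)]

lemma capsInitA_eq : capsInitA = capsD false false false := by
  simp [capsInitA, capsD, PySem.Dict.ofList, PySem.Dict.update, PySem.Dict.empty, PySem.Dict.insert]

lemma ins_fu (bf bw bc : Bool) : (capsD bf bw bc).insert "file_upload" true = capsD true bw bc := by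
  simp [capsD, PySem.Dict.insert]

lemma ins_ws (bf bw bc : Bool) : (capsD bf bw bc).insert "web_search" true = capsD bf true bc := by
  simp [capsD, PySem.Dict.insert]

lemma ins_ci (bf bw bc : Bool) : (capsD bf bw bc).insert "code_interpreter" true = capsD bf bw true := by
  simp [capsD, PySem.Dict.insert]

lemma stepA (t : String) (bf bw bc : Bool) :
    (match toolCapMapA.get? t with
      | some cap => (capsD bf bw bc).insert cap true
      | none => capsD bf bw bc)
    = capsD (bf || (t == "file_search" || t == "retrieval")) (bw || t == "web_search")
        (bc || (t == "code_interpreter" || t == "execute_code")) := by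
  by_cases h1 : t = "file_search"
  · subst h1
    have hg : toolCapMapA.get? "file_search" = some "file_upload" := by
      simp [toolCapMapA, PySem.Dict.ofList, PySem.Dict.update, PySem.Dict.empty, PySem.Dict.insert, PySem.Dict.get?]
    rw [hg]; simp only [ins_fu]; simp
  by_cases h2 : t = "retrieval"
  · subst h2
    have hg : toolCapMapA.get? "retrieval" = some "file_upload" := by
      simp [toolCapMapA, PySem.Dict.ofList, PySem.Dict.update, PySem.Dict.empty, PySem.Dict.insert, PySem.Dict.get?]
    rw [hg]; simp only [ins_fu]; simp
  by_cases h3 : t = "web_search"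
  · subst h3
    have hg : toolCapMapA.get? "web_search" = some "web_search" := by
      simp [toolCapMapA, PySem.Dict.ofList, PySem.Dict.update, PySem.Dict.empty, PySem.Dict.insert, PySem.Dict.get?]
    rw [hg]; simp only [ins_ws]; simp
  by_cases h4 : t = "code_interpreter"
  · subst h4
    have hg : toolCapMapA.get? "code_interpreter" = some "code_interpreter" := by
      simp [toolCapMapA, PySem.Dict.ofList, PySem.Dict.update, PySem.Dict.empty, PySem.Dict.insert, PySem.Dict.get?]
    rw [hg]; simp only [ins_ci]; simp
  by_cases h5 : t = "execute_code"
  · subst h5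
    have hg : toolCapMapA.get? "execute_code" = some "code_interpreter" := by
      simp [toolCapMapA, PySem.Dict.ofList, PySem.Dict.update, PySem.Dict.empty, PySem.Dict.insert, PySem.Dict.get?]
    rw [hg]; simp only [ins_ci]; simp
  have g1 : ("file_search" == t) = false := by simp [beq_eq_false_iff_ne]; exact fun h => h1 h.symm
  have g2 : ("retrieval" == t) = false := by simp [beq_eq_false_iff_ne]; exact fun h => h2 h.symm
  have g3 : ("web_search" == t) = false := by simp [beq_eq_false_iff_ne]; exact fun h => h3 h.symm
  have g4 : ("code_interpreter" == t) = false := by simp [beq_eq_false_iff_ne]; exact fun h => h4 h.symm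
  have g5 : ("execute_code" == t) = false := by simp [beq_eq_false_iff_ne]; exact fun h => h5 h.symm
  have hg : toolCapMapA.get? t = none := by
    simp [toolCapMapA, PySem.Dict.ofList, PySem.Dict.update, PySem.Dict.empty, PySem.Dict.insert, PySem.Dict.get?,
      g1, g2, g3, g4, g5]
  have f1 : (t == "file_search") = false := by simp [h1]
  have f2 : (t == "retrieval") = false := by simp [h2]
  have f3 : (t == "web_search") = false := by simp [h3]
  have f4 : (t == "code_interpreter") = false := by simp [h4]
  have f5 : (t == "execute_code") = false := by simp [h5]
  rw [hg]
  simp [f1, f2, f3, f4, f5]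

lemma foldA (tools : List String) (bf bw bc : Bool) :
    tools.foldl (fun caps tool =>
      match toolCapMapA.get? tool with
      | some cap => caps.insert cap true
      | none => caps) (capsD bf bw bc)
    = capsD (bf || (tools.any (· == "file_search") || tools.any (· == "retrieval")))
        (bw || tools.any (· == "web_search"))
        (bc || (tools.any (· == "code_interpreter") || tools.any (· == "execute_code"))) := by
  induction tools generalizing bf bw bc with
  | nil => simp
  | cons t ts ih =>
    simp only [List.foldl_cons, List.any_cons]
    rw [stepA, ih]
    simp [Bool.or_assoc, Bool.or_left_comm]

lemma altB (tools : List String) :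
    map_librechat_tools_to_capabilities_alt tools
    = (capsD (tools.any (· == "file_search") || tools.any (· == "retrieval"))
        (tools.any (· == "web_search"))
        (tools.any (· == "code_interpreter") || tools.any (· == "execute_code"))).items := by
  have hmem : ∀ s : String, PySem.Set.contains (PySem.Set.ofList tools) s = tools.any (· == s) := by
    intro s
    simp [PySem.Set.contains, PySem.Set.mem_ofList, List.any_beq']
  simp only [map_librechat_tools_to_capabilities_alt, hmem, capsD, PySem.Dict.items]

-- ===== VERDICT (by name: the statement is the Claim_ definition above) =====
theorem map_librechat_tools_to_capabilities_spec : Claim_equal_map_librechat_tools_to_capabilities := by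
  intro tools _
  show map_librechat_tools_to_capabilities tools = map_librechat_tools_to_capabilities_alt tools
  rw [map_librechat_tools_to_capabilities, capsInitA_eq, foldA, altB]
  simp
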